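-- pv_equiv track=rewrite | github.com/lengweih/pricethatpokemon-telegram-bot | pricing.py | detect_variant_hint
-- ===== SOURCE A (Python) =====
-- VARIANT_HINT_TERMS = {
--     "normal": "normal",
--     "holo": "holofoil",
--     "holofoil": "holofoil",
--     "foil": "holofoil",
--     "reverse": "reverseHolofoil",
--     "rev": "reverseHolofoil",
--     "1st": "1stEditionNormal",
--     "first": "1stEditionNormal",
--     "unlimited": "unlimited",
-- }
--
-- def detect_variant_hint(tokens: tuple[str, ...]) -> str | None:
--     token_set = set(tokens)
--     if "reverse" in token_set or "rev" in token_set: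
--         return "reverseHolofoil"
--     if ("1st" in token_set or "first" in token_set) and "holo" in token_set:
--         return "1stEditionHolofoil"
--     if "1st" in token_set or "first" in token_set:
--         return "1stEditionNormal"
--     if "unlimited" in token_set and "holo" in token_set:
--         return "unlimitedHolofoil"
--     for token in tokens:
--         if token in VARIANT_HINT_TERMS:
--             return VARIANT_HINT_TERMS[token]
--     return None
-- ===== SOURCE B (Python) =====
-- VARIANT_HINT_TERMS = {
--     "normal": "normal",
--     "holo": "holofoil",
--     "holofoil": "holofoil",
--     "foil": "holofoil",
--     "reverse": "reverseHolofoil",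
--     "rev": "reverseHolofoil",
--     "1st": "1stEditionNormal",
--     "first": "1stEditionNormal",
--     "unlimited": "unlimited",
-- }
--
-- # bit weights: reverse=8, 1st/first=4, holo=2, unlimited=1
-- _HINT_BIT = {"reverse": 8, "rev": 8, "1st": 4, "first": 4, "holo": 2, "unlimited": 1}
--
-- # decision table indexed by the OR-ed bitmask; None = fall back to first dict hit
-- _MASK_RESULT = [
--     None, None, None, "unlimitedHolofoil",
--     "1stEditionNormal", "1stEditionNormal", "1stEditionHolofoil", "1stEditionHolofoil",
--     "reverseHolofoil", "reverseHolofoil", "reverseHolofoil", "reverseHolofoil",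
--     "reverseHolofoil", "reverseHolofoil", "reverseHolofoil", "reverseHolofoil",
-- ]
--
-- def detect_variant_hint(tokens):
--     mask = 0
--     for token in tokens:
--         mask |= _HINT_BIT.get(token, 0)
--     result = _MASK_RESULT[mask]
--     if result is not None:
--         return result
--     return next((VARIANT_HINT_TERMS[t] for t in tokens if t in VARIANT_HINT_TERMS), None)
-- ===== Notes on version B (the rewrite author's own statement) =====
-- stated objective: alternative
-- what changed: Replaced A's set construction and ordered cascade of membership tests by OR-ing per-token bit weights into a 4-bit mask and indexing a precomputed 16-entry decision table, with the first dictionary hit (a generator + next) as fallback when the table entry is empty.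
import Mathlib
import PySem

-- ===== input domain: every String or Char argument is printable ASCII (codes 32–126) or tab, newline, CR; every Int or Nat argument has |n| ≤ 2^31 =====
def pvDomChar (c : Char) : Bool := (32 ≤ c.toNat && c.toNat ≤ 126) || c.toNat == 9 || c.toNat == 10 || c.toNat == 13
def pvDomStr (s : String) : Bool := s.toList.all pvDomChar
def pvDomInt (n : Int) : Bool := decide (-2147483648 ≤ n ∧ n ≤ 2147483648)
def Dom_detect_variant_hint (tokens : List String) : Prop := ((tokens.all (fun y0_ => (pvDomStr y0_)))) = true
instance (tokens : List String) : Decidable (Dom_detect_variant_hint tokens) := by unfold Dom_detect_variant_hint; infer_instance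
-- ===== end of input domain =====

-- B replaces A's cascade of set-membership checks by OR-ing per-token bit weights
-- into a mask and indexing a 16-entry decision table, with the first dict hit as
-- fallback (objective: alternative).


-- ===== PORT A =====
def variantHintTerms : PySem.Dict String String := PySem.Dict.ofList
  [("normal", "normal"), ("holo", "holofoil"), ("holofoil", "holofoil"),
   ("foil", "holofoil"), ("reverse", "reverseHolofoil"), ("rev", "reverseHolofoil"),
   ("1st", "1stEditionNormal"), ("first", "1stEditionNormal"), ("unlimited", "unlimited")]

-- the final 'for token in tokens: if token in VARIANT_HINT_TERMS: return VARIANT_HINT_TERMS[token]'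
def hintLoop : List String → Option String
  | [] => none
  | t :: rest =>
    if variantHintTerms.contains t then variantHintTerms.get? t else hintLoop rest

def detect_variant_hint (tokens : List String) : Option String :=
  let tokenSet : PySem.Set String := PySem.Set.ofList tokens
  if "reverse" ∈ tokenSet ∨ "rev" ∈ tokenSet then some "reverseHolofoil"
  else if ("1st" ∈ tokenSet ∨ "first" ∈ tokenSet) ∧ "holo" ∈ tokenSet then some "1stEditionHolofoil"
  else if "1st" ∈ tokenSet ∨ "first" ∈ tokenSet then some "1stEditionNormal"
  else if "unlimited" ∈ tokenSet ∧ "holo" ∈ tokenSet then some "unlimitedHolofoil"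
  else hintLoop tokens

-- ===== PORT B =====
-- bit weights: reverse=8, 1st/first=4, holo=2, unlimited=1 (_HINT_BIT in Source B)
def hintBitDict : PySem.Dict String Nat := PySem.Dict.ofList
  [("reverse", 8), ("rev", 8), ("1st", 4), ("first", 4), ("holo", 2), ("unlimited", 1)]

-- decision table indexed by the OR-ed bitmask (_MASK_RESULT in Source B)
def maskResult : List (Option String) :=
  [none, none, none, some "unlimitedHolofoil",
   some "1stEditionNormal", some "1stEditionNormal",
   some "1stEditionHolofoil", some "1stEditionHolofoil",
   some "reverseHolofoil", some "reverseHolofoil", some "reverseHolofoil", some "reverseHolofoil",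
   some "reverseHolofoil", some "reverseHolofoil", some "reverseHolofoil", some "reverseHolofoil"]

def detect_variant_hint_alt (tokens : List String) : Option String :=
  let mask := tokens.foldl (fun m t => m ||| hintBitDict.getD t 0) 0
  match maskResult.getD mask none with
  | some r => some r
  | none => tokens.findSome? (fun t => variantHintTerms.get? t)

-- ===== PRECONDITION & SPEC =====
def Spec_detect_variant_hint (tokens : List String) (out : Option String) : Prop := out = detect_variant_hint_alt tokens
instance (tokens : List String) (out : Option String) : Decidable (Spec_detect_variant_hint tokens out) := by unfold Spec_detect_variant_hint; infer_instance

-- ===== CLAIM (what is proved, stated in full; the proofs are below) =====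
def Claim_equal_detect_variant_hint : Prop := ∀ (tokens : List String), Dom_detect_variant_hint tokens → Spec_detect_variant_hint tokens (detect_variant_hint tokens)

-- ===== LEMMAS AND PROOFS =====

-- A's fallback scan unfolds one step via the dict lookup
theorem hintLoop_cons (t : String) (ts : List String) :
    hintLoop (t :: ts) =
      match variantHintTerms.get? t with
      | none => hintLoop ts
      | some v => some v := by
  simp only [hintLoop]
  rw [PySem.Dict.contains_eq_isSome_get?]
  cases variantHintTerms.get? t <;> simp

-- A's fallback scan is the first dict hit (B's generator)
theorem hintLoop_eq_findSome (ts : List String) :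
    hintLoop ts = ts.findSome? (fun t => variantHintTerms.get? t) := by
  induction ts with
  | nil => simp [hintLoop]
  | cons t ts ih =>
    rw [hintLoop_cons, List.findSome?_cons]
    cases variantHintTerms.get? t <;> simp [ih]

-- the mask B's fold computes, characterised by the four membership conditions
def fullMask (ts : List String) : Nat :=
  (if ts.contains "reverse" || ts.contains "rev" then 8 else 0) |||
  (if ts.contains "1st" || ts.contains "first" then 4 else 0) |||
  (if ts.contains "holo" then 2 else 0) |||
  (if ts.contains "unlimited" then 1 else 0)

theorem hintBit_other (t : String) (h1 : t ≠ "reverse") (h2 : t ≠ "rev") (h3 : t ≠ "1st")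
    (h4 : t ≠ "first") (h5 : t ≠ "holo") (h6 : t ≠ "unlimited") :
    hintBitDict.getD t 0 = 0 := by
  have hd : hintBitDict =
      PySem.Dict.mk [("reverse", 8), ("rev", 8), ("1st", 4), ("first", 4), ("holo", 2), ("unlimited", 1)] := by
    decide
  have b1 : ("reverse" == t) = false := by simp [Ne.symm h1]
  have b2 : ("rev" == t) = false := by simp [Ne.symm h2]
  have b3 : ("1st" == t) = false := by simp [Ne.symm h3]
  have b4 : ("first" == t) = false := by simp [Ne.symm h4]
  have b5 : ("holo" == t) = false := by simp [Ne.symm h5]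
  have b6 : ("unlimited" == t) = false := by simp [Ne.symm h6]
  rw [hd]
  simp [PySem.Dict.getD, PySem.Dict.get?, List.find?, b1, b2, b3, b4, b5, b6]

theorem fullMask_cons (t : String) (ts : List String) :
    fullMask (t :: ts) = hintBitDict.getD t 0 ||| fullMask ts := by
  by_cases h1 : t = "reverse"
  · subst h1
    have hb : hintBitDict.getD "reverse" 0 = 8 := by decide
    rw [hb]
    simp only [fullMask, List.contains_cons]
    cases c1 : ts.contains "reverse" <;> cases c2 : ts.contains "rev" <;>
      cases c3 : ts.contains "1st" <;> cases c4 : ts.contains "first" <;>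
      cases c5 : ts.contains "holo" <;> cases c6 : ts.contains "unlimited" <;> decide
  by_cases h2 : t = "rev"
  · subst h2
    have hb : hintBitDict.getD "rev" 0 = 8 := by decide
    rw [hb]
    simp only [fullMask, List.contains_cons]
    cases c1 : ts.contains "reverse" <;> cases c2 : ts.contains "rev" <;>
      cases c3 : ts.contains "1st" <;> cases c4 : ts.contains "first" <;>
      cases c5 : ts.contains "holo" <;> cases c6 : ts.contains "unlimited" <;> decide
  by_cases h3 : t = "1st"
  · subst h3
    have hb : hintBitDict.getD "1st" 0 = 4 := by decide
    rw [hb]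
    simp only [fullMask, List.contains_cons]
    cases c1 : ts.contains "reverse" <;> cases c2 : ts.contains "rev" <;>
      cases c3 : ts.contains "1st" <;> cases c4 : ts.contains "first" <;>
      cases c5 : ts.contains "holo" <;> cases c6 : ts.contains "unlimited" <;> decide
  by_cases h4 : t = "first"
  · subst h4
    have hb : hintBitDict.getD "first" 0 = 4 := by decide
    rw [hb]
    simp only [fullMask, List.contains_cons]
    cases c1 : ts.contains "reverse" <;> cases c2 : ts.contains "rev" <;>
      cases c3 : ts.contains "1st" <;> cases c4 : ts.contains "first" <;>
      cases c5 : ts.contains "holo" <;> cases c6 : ts.contains "unlimited" <;> decide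
  by_cases h5 : t = "holo"
  · subst h5
    have hb : hintBitDict.getD "holo" 0 = 2 := by decide
    rw [hb]
    simp only [fullMask, List.contains_cons]
    cases c1 : ts.contains "reverse" <;> cases c2 : ts.contains "rev" <;>
      cases c3 : ts.contains "1st" <;> cases c4 : ts.contains "first" <;>
      cases c5 : ts.contains "holo" <;> cases c6 : ts.contains "unlimited" <;> decide
  by_cases h6 : t = "unlimited"
  · subst h6
    have hb : hintBitDict.getD "unlimited" 0 = 1 := by decide
    rw [hb]
    simp only [fullMask, List.contains_cons]
    cases c1 : ts.contains "reverse" <;> cases c2 : ts.contains "rev" <;>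
      cases c3 : ts.contains "1st" <;> cases c4 : ts.contains "first" <;>
      cases c5 : ts.contains "holo" <;> cases c6 : ts.contains "unlimited" <;> decide
  · rw [hintBit_other t h1 h2 h3 h4 h5 h6, Nat.zero_or]
    simp only [fullMask, List.contains_cons]
    simp [Ne.symm h1, Ne.symm h2, Ne.symm h3, Ne.symm h4, Ne.symm h5, Ne.symm h6]

theorem foldl_mask_spec (ts : List String) (m0 : Nat) :
    ts.foldl (fun m t => m ||| hintBitDict.getD t 0) m0 = m0 ||| fullMask ts := by
  induction ts generalizing m0 with
  | nil => simp [fullMask]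
  | cons t ts ih =>
    simp only [List.foldl_cons]
    rw [ih, fullMask_cons, Nat.or_assoc]

theorem detect_variant_hint_eq (tokens : List String) :
    detect_variant_hint tokens = detect_variant_hint_alt tokens := by
  simp only [detect_variant_hint, detect_variant_hint_alt]
  rw [foldl_mask_spec, Nat.zero_or, hintLoop_eq_findSome]
  simp only [PySem.Set.mem_ofList]
  by_cases m1 : "reverse" ∈ tokens <;> by_cases m2 : "rev" ∈ tokens <;>
    by_cases m3 : "1st" ∈ tokens <;> by_cases m4 : "first" ∈ tokens <;>
    by_cases m5 : "holo" ∈ tokens <;> by_cases m6 : "unlimited" ∈ tokens <;>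
    simp [fullMask, maskResult, m1, m2, m3, m4, m5, m6]

-- ===== VERDICT (by name: the statement is the Claim_ definition above) =====
theorem detect_variant_hint_spec : Claim_equal_detect_variant_hint := by
  intro tokens _
  unfold Spec_detect_variant_hint
  exact detect_variant_hint_eq tokens
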